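-- pv_equiv track=rewrite | github.com/stofnun-arna-magnussonar/IceStaBS-Eval | generate_corrections.py | find_sentence_index
-- ===== SOURCE A (Python) =====
-- def find_sentence_index(sentences, char_start):
--     """Find the index of the sentence containing the character at char_start"""
--     total_chars = 0  # Cumulative length of sentences
--
--     for i, sentence in enumerate(sentences):
--         sentence_length = len(sentence) + 1  # +1 for the invisible break '\uefff'
--         if total_chars <= char_start < total_chars + sentence_length:
--             return i, total_chars
--         total_chars += sentence_length
--
--     return None, None  # Return None if char_start is out of bounds
-- ===== SOURCE B (Python) =====
-- def find_sentence_index(sentences, char_start):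
--     """Prefix-start table + hand-written binary search instead of a linear scan."""
--     starts = [0]
--     for s in sentences:
--         starts.append(starts[-1] + len(s) + 1)
--     lo, hi = 0, len(starts)
--     while lo < hi:
--         mid = (lo + hi) // 2
--         if starts[mid] <= char_start:
--             lo = mid + 1
--         else:
--             hi = mid
--     if 1 <= lo <= len(sentences):
--         return lo - 1, starts[lo - 1]
--     return None, None
-- ===== Notes on version B (the rewrite author's own statement) =====
-- stated objective: alternative
-- what changed: Replaces A's enumerate-and-scan over sentences with building a prefix-start table once and locating the sentence by a hand-written binary search over it.
import Mathlib
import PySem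

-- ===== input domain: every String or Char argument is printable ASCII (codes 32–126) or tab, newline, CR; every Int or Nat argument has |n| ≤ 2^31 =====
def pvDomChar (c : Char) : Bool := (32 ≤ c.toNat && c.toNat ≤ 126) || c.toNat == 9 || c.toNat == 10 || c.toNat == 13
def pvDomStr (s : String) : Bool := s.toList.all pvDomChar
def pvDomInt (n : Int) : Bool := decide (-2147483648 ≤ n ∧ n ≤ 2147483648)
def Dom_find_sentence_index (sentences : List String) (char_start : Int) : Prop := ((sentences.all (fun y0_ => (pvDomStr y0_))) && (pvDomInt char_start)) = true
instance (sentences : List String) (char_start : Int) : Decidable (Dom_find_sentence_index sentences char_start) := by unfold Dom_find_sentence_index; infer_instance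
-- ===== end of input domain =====

-- B replaces A's linear scan with a prefix-start table plus binary search (objective: alternative decomposition).

-- ===== PORT A =====
-- A's for-loop with early return, as structural recursion carrying (i, total_chars).
def findGoA : List String → Int → Int → Int → Option Int × Option Int
  | [], _, _, _ => (none, none)
  | sentence :: rest, char_start, i, total_chars =>
    let sentence_length := PySem.Str.len sentence + 1
    if total_chars ≤ char_start ∧ char_start < total_chars + sentence_length then
      (some i, some total_chars)
    else
      findGoA rest char_start (i + 1) (total_chars + sentence_length)

def find_sentence_index (sentences : List String) (char_start : Int) : Option Int × Option Int :=
  findGoA sentences char_start 0 0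

-- ===== PORT B =====
-- Source B's loop 'starts.append(starts[-1] + len(s) + 1)'
def buildStartsB (sentences : List String) : List Int :=
  sentences.foldl (fun starts s => starts ++ [starts.getLastD 0 + PySem.Str.len s + 1]) [0]

-- Source B's hand-written while-loop binary search; structural recursion on a fuel
-- that bounds hi - lo (each iteration shrinks hi - lo, so the fuel never runs out).
def bsearchB (starts : List Int) (c : Int) : Nat → Nat → Nat → Nat
  | lo, _, 0 => lo
  | lo, hi, fuel + 1 =>
    if lo < hi then
      let mid := (lo + hi) / 2
      if starts.getD mid 0 ≤ c then bsearchB starts c (mid + 1) hi fuel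
      else bsearchB starts c lo mid fuel
    else lo

def find_sentence_index_alt (sentences : List String) (char_start : Int) : Option Int × Option Int :=
  let starts := buildStartsB sentences
  let lo := bsearchB starts char_start 0 starts.length starts.length
  if 1 ≤ lo ∧ lo ≤ sentences.length then
    (some ((lo : Int) - 1), some (starts.getD (lo - 1) 0))
  else
    (none, none)

-- ===== PRECONDITION & SPEC =====
def Spec_find_sentence_index (sentences : List String) (char_start : Int) (out : Option Int × Option Int) : Prop := out = find_sentence_index_alt sentences char_start
instance (sentences : List String) (char_start : Int) (out : Option Int × Option Int) : Decidable (Spec_find_sentence_index sentences char_start out) := by unfold Spec_find_sentence_index; infer_instance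

-- ===== CLAIM (what is proved, stated in full; the proofs are below) =====
def Claim_equal_find_sentence_index : Prop := ∀ (sentences : List String) (char_start : Int), Dom_find_sentence_index sentences char_start → Spec_find_sentence_index sentences char_start (find_sentence_index sentences char_start)

-- ===== LEMMAS AND PROOFS =====

-- The list of cumulative sentence starts from offset t (proof-side view of buildStartsB).
def startsFrom (t : Int) : List String → List Int
  | [] => [t]
  | s :: rest => t :: startsFrom (t + PySem.Str.len s + 1) rest

theorem length_startsFrom (t : Int) (ss : List String) :
    (startsFrom t ss).length = ss.length + 1 := by
  induction ss generalizing t with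
  | nil => simp [startsFrom]
  | cons s rest ih => simp [startsFrom, ih]

theorem mem_startsFrom_ge {t x : Int} {ss : List String} (hx : x ∈ startsFrom t ss) : t ≤ x := by
  induction ss generalizing t with
  | nil => simp [startsFrom] at hx; omega
  | cons s rest ih =>
    simp [startsFrom] at hx
    rcases hx with h | h
    · omega
    · have := ih h
      have := (PySem.Str.len_eq s) ▸ (by positivity : (0:Int) ≤ (s.toList.length : Int))
      omega

theorem pairwise_startsFrom (t : Int) (ss : List String) :
    List.Pairwise (· ≤ ·) (startsFrom t ss) := by
  induction ss generalizing t with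
  | nil => simp [startsFrom]
  | cons s rest ih =>
    refine List.pairwise_cons.mpr ⟨fun x hx => ?_, ih _⟩
    have := mem_startsFrom_ge hx
    have := (PySem.Str.len_eq s) ▸ (by positivity : (0:Int) ≤ (s.toList.length : Int))
    omega

theorem buildStartsB_eq_aux (ss : List String) :
    ∀ (pref : List Int) (t : Int),
      ss.foldl (fun starts s => starts ++ [starts.getLastD 0 + PySem.Str.len s + 1]) (pref ++ [t])
        = pref ++ startsFrom t ss := by
  induction ss with
  | nil => intro pref t; simp [startsFrom]
  | cons s rest ih =>
    intro pref t
    have h1 : (pref ++ [t]).getLastD 0 = t := List.getLastD_concat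
    simp only [List.foldl_cons, h1]
    have := ih (pref ++ [t]) (t + PySem.Str.len s + 1)
    simpa [startsFrom] using this

theorem buildStartsB_eq (ss : List String) : buildStartsB ss = startsFrom 0 ss := by
  have := buildStartsB_eq_aux ss [] 0
  simpa [buildStartsB] using this

theorem startsFrom_mono (t : Int) (ss : List String) {i j : Nat}
    (hij : i ≤ j) (hj : j < (startsFrom t ss).length) :
    (startsFrom t ss).getD i 0 ≤ (startsFrom t ss).getD j 0 := by
  rcases Nat.lt_or_ge i j with h | h
  · have hi : i < (startsFrom t ss).length := by omega
    rw [List.getD_eq_getElem _ _ hi, List.getD_eq_getElem _ _ hj]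
    exact List.pairwise_iff_getElem.mp (pairwise_startsFrom t ss) i j hi hj h
  · have : i = j := by omega
    simp [this]

theorem countP_startsFrom_zero {c t : Int} (ss : List String) (h : c < t) :
    (startsFrom t ss).countP (fun x => decide (x ≤ c)) = 0 := by
  refine List.countP_eq_zero.mpr fun x hx => ?_
  have := mem_startsFrom_ge hx
  simp; omega

theorem findGoA_char (ss : List String) :
    ∀ (c i t : Int),
      findGoA ss c i t =
        (let S := startsFrom t ss
         let r := S.countP (fun x => decide (x ≤ c))
         if 1 ≤ r ∧ r ≤ ss.length then (some (i + r - 1), some (S.getD (r - 1) 0))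
         else (none, none)) := by
  induction ss with
  | nil =>
    intro c i t
    simp only [findGoA, startsFrom]
    by_cases h : t ≤ c <;> simp [List.countP, List.countP.go, h]
  | cons s rest ih =>
    intro c i t
    have hlen0 : (0:Int) ≤ PySem.Str.len s := by simp [PySem.Str.len_eq]
    simp only [findGoA, startsFrom]
    generalize hg : PySem.Str.len s = L at hlen0 ⊢
    have hassoc : t + (L + 1) = t + L + 1 := by ring
    by_cases h1 : t ≤ c ∧ c < t + (L + 1)
    · -- hit: r = 1
      have hr0 : (startsFrom (t + L + 1) rest).countP (fun x => decide (x ≤ c)) = 0 :=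
        countP_startsFrom_zero rest (by omega)
      have h1d : decide (t ≤ c) = true := by simp [h1.1]
      rw [if_pos h1]
      simp only [List.countP_cons, hr0, h1d, if_true, List.length_cons, Nat.zero_add]
      rw [if_pos (by omega : 1 ≤ 1 ∧ 1 ≤ rest.length + 1)]
      simp only [Prod.mk.injEq, Option.some.injEq]
      constructor
      · push_cast; ring
      · rfl
    · by_cases h2 : t ≤ c
      · -- c ≥ t + L + 1 : recurse, r = r' + 1
        have hcl : t + L + 1 ≤ c := by omega
        have hr1 : 1 ≤ (startsFrom (t + L + 1) rest).countP (fun x => decide (x ≤ c)) := by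
          have hmem : (t + L + 1) ∈ startsFrom (t + L + 1) rest := by
            cases rest <;> simp [startsFrom]
          exact List.countP_pos_iff.mpr ⟨t + L + 1, hmem, by simp [hcl]⟩
        have h2d : decide (t ≤ c) = true := by simp [h2]
        rw [if_neg h1, hassoc, ih c (i + 1) (t + L + 1)]
        simp only [List.countP_cons, h2d, if_true, List.length_cons]
        set r' := (startsFrom (t + L + 1) rest).countP (fun x => decide (x ≤ c)) with hr'
        by_cases h3 : 1 ≤ r' ∧ r' ≤ rest.length
        · rw [if_pos h3, if_pos (show 1 ≤ r' + 1 ∧ r' + 1 ≤ rest.length + 1 by omega)]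
          simp only [Prod.mk.injEq, Option.some.injEq]
          constructor
          · push_cast; ring
          · have hidx : r' + 1 - 1 = (r' - 1) + 1 := by omega
            rw [hidx, List.getD_cons_succ]
        · rw [if_neg h3, if_neg (by omega)]
      · -- c < t : both none
        have hr0 : (startsFrom (t + L + 1) rest).countP (fun x => decide (x ≤ c)) = 0 :=
          countP_startsFrom_zero rest (by omega)
        have h2d : decide (t ≤ c) = false := by simp [h2]
        rw [if_neg h1, hassoc, ih c (i + 1) (t + L + 1)]
        simp only [List.countP_cons, hr0, h2d, Bool.false_eq_true, if_false, List.length_cons, Nat.zero_add]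
        rw [if_neg (by omega), if_neg (by omega)]

theorem countP_eq_boundary (S : List Int) (c : Int) (lo : Nat) (hlo : lo ≤ S.length)
    (hbelow : ∀ j, j < lo → S.getD j 0 ≤ c)
    (habove : ∀ j, lo ≤ j → j < S.length → ¬ S.getD j 0 ≤ c) :
    S.countP (fun x => decide (x ≤ c)) = lo := by
  have hsplit : S = S.take lo ++ S.drop lo := (List.take_append_drop lo S).symm
  rw [hsplit, List.countP_append]
  have h1 : (S.take lo).countP (fun x => decide (x ≤ c)) = lo := by
    have hall : ∀ x ∈ S.take lo, decide (x ≤ c) = true := by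
      intro x hx
      rcases List.mem_iff_getElem.mp hx with ⟨j, hj, hjx⟩
      have hjlo : j < lo := by
        have := hj; simp [List.length_take] at this; omega
      have hjS : j < S.length := by omega
      have : (S.take lo)[j] = S[j] := List.getElem_take
      have hle := hbelow j hjlo
      rw [List.getD_eq_getElem _ _ hjS] at hle
      simp [← hjx, this, hle]
    rw [List.countP_eq_length.mpr hall]
    simp [List.length_take]; omega
  have h2 : (S.drop lo).countP (fun x => decide (x ≤ c)) = 0 := by
    refine List.countP_eq_zero.mpr fun x hx => ?_
    rcases List.mem_iff_getElem.mp hx with ⟨j, hj, hjx⟩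
    have hjS : lo + j < S.length := by
      have := hj; simp [List.length_drop] at this; omega
    have : (S.drop lo)[j] = S[lo + j] := by
      simp [List.getElem_drop]
    have hgt := habove (lo + j) (by omega) hjS
    rw [List.getD_eq_getElem _ _ hjS] at hgt
    simp [← hjx, this]
    omega
  omega

theorem bsearchB_eq_countP (S : List Int) (c : Int)
    (mono : ∀ {i j : Nat}, i ≤ j → j < S.length → S.getD i 0 ≤ S.getD j 0) :
    ∀ (fuel lo hi : Nat), hi - lo ≤ fuel → lo ≤ hi → hi ≤ S.length →
      (∀ j, j < lo → S.getD j 0 ≤ c) →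
      (∀ j, hi ≤ j → j < S.length → ¬ S.getD j 0 ≤ c) →
      bsearchB S c lo hi fuel = S.countP (fun x => decide (x ≤ c)) := by
  intro fuel
  induction fuel with
  | zero =>
    intro lo hi hf hle hhi hbelow habove
    have hlh : lo = hi := by omega
    subst hlh
    simp only [bsearchB]
    exact (countP_eq_boundary S c lo (by omega) hbelow habove).symm
  | succ fuel ih =>
    intro lo hi hf hle hhi hbelow habove
    simp only [bsearchB]
    by_cases h : lo < hi
    · rw [if_pos h]
      by_cases hc : S.getD ((lo + hi) / 2) 0 ≤ c
      · rw [if_pos hc]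
        refine ih ((lo + hi) / 2 + 1) hi (by omega) (by omega) hhi ?_ habove
        intro j hj
        rcases Nat.lt_or_ge j lo with h' | h'
        · exact hbelow j h'
        · exact le_trans (mono (by omega) (by omega)) hc
      · rw [if_neg hc]
        refine ih lo ((lo + hi) / 2) (by omega) (by omega) (by omega) hbelow ?_
        intro j hj hjS hle'
        exact hc (le_trans (mono hj hjS) hle')
    · rw [if_neg h]
      have hlh : lo = hi := by omega
      subst hlh
      exact (countP_eq_boundary S c lo (by omega) hbelow habove).symm

-- ===== VERDICT (by name: the statement is the Claim_ definition above) =====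
theorem find_sentence_index_spec : Claim_equal_find_sentence_index := by
  intro sentences char_start _
  unfold Spec_find_sentence_index find_sentence_index find_sentence_index_alt
  rw [buildStartsB_eq]
  set S := startsFrom 0 sentences with hS
  have hlenS : S.length = sentences.length + 1 := length_startsFrom 0 sentences
  have hbs : bsearchB S char_start 0 S.length S.length = S.countP (fun x => decide (x ≤ char_start)) := by
    refine bsearchB_eq_countP S char_start (fun {i j} hij hj => startsFrom_mono 0 sentences hij hj)
      S.length 0 S.length (by omega) (by omega) le_rfl (by omega) (by omega)
  rw [findGoA_char sentences char_start 0 0]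
  simp only [hbs]
  set r := S.countP (fun x => decide (x ≤ char_start)) with hr
  by_cases h : 1 ≤ r ∧ r ≤ sentences.length
  · rw [if_pos h, if_pos h]
    simp only [← hS, zero_add]
  · rw [if_neg h, if_neg h]
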